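-- pv_equiv track=rewrite | github.com/mcieno/HashCode | 18-Pizza/solution.py | sizes
-- ===== SOURCE A (Python) =====
-- def sizes(num):
--
--     def factor(x):
--         for d in range(1, x // 2 + 1):
--             if x % d == 0:
--                 yield d
--         yield num
--
--     for div in factor(num):
--         yield (div, num // div)
-- ===== SOURCE B (Python) =====
-- def sizes(num):
--     # Trial division only up to sqrt(num): collect the small divisors, then
--     # emit each pair once ascending and the mirrored large-divisor pairs.
--     small = []
--     d = 1
--     while d * d <= num:
--         if num % d == 0:
--             small.append(d)
--         d += 1
--     for d in small:
--         yield (d, num // d)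
--     for d in reversed(small):
--         q = num // d
--         if q != d:
--             yield (q, d)
-- ===== Notes on version B (the rewrite author's own statement) =====
-- stated objective: faster
-- what changed: A trial-divides every candidate up to half of num (O(n)); B trial-divides only up to sqrt(num), collecting the small divisors once and emitting the large complementary divisors by walking that list backwards, so the output is still ascending without sorting (O(sqrt n)).
-- intended difference: On negative num A returns [(num, 1)] — an artifact of the unconditional trailing 'yield num' after an empty range — while B returns [], the intended value since a negative number has no positive divisor pairs. — e.g. on sizes(-6): A returns [(-6, 1)], B returns []
-- outside the precondition, e.g. on sizes(0): A raises ZeroDivisionError, B returns []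
import Mathlib
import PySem

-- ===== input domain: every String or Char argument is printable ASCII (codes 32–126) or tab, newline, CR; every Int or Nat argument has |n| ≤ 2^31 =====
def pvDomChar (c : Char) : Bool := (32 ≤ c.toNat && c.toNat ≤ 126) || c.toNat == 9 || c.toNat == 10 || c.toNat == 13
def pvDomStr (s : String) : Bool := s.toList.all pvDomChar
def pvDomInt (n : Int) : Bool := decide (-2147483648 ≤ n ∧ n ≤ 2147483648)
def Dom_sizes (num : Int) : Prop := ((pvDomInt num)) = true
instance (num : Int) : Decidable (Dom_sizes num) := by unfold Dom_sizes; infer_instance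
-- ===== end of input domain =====

-- B replaces A's linear scan to half of num with trial division up to sqrt(num), pairing each
-- small divisor with its complement, for an asymptotically faster exact re-implementation.

-- ===== PORT A =====
def sizes (num : Int) : List (Int × Int) :=
  let factor : List Int :=
    ((PySem.List.pyRange 1 (PySem.Int.floordiv num 2 + 1) 1).filter
      (fun d => PySem.Int.mod num d == 0)) ++ [num]
  factor.map (fun dv => (dv, PySem.Int.floordiv num dv))

-- ===== PORT B =====
-- the 'while d * d <= num' loop of Source B, with a fuel argument only to make it structurally
-- recursive (num.toNat steps always suffice: the loop body needs d ≤ num)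
def trialLoop (num d : Int) : Nat → List Int
  | 0 => []
  | t + 1 =>
    if d * d ≤ num then
      (if PySem.Int.mod num d == 0 then [d] else []) ++ trialLoop num (d + 1) t
    else []

def sizes_alt (num : Int) : List (Int × Int) :=
  let small := trialLoop num 1 num.toNat
  small.map (fun d => (d, PySem.Int.floordiv num d)) ++
    small.reverse.filterMap (fun d =>
      let q := PySem.Int.floordiv num d
      if q ≠ d then some (q, d) else none)

-- ===== PRECONDITION & SPEC =====
-- Pre_ excludes only num = 0, where A raises ZeroDivisionError (num // div with div = 0).
def Pre_sizes (num : Int) : Prop := num ≠ 0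
instance (num : Int) : Decidable (Pre_sizes num) := by unfold Pre_sizes; infer_instance
def pvWitness_sizes : Int := 12

-- On negative num A returns [(num, 1)] — an artifact of the unconditional trailing
-- 'yield num' after an empty range — while B returns [], the intended value since a
-- negative number has no positive divisor pairs.
def D_sizes (num : Int) : Prop := num < 0
instance (num : Int) : Decidable (D_sizes num) := by unfold D_sizes; infer_instance

def Spec_sizes (num : Int) (out : List (Int × Int)) : Prop := ¬ D_sizes num → out = sizes_alt num
instance (num : Int) (out : List (Int × Int)) : Decidable (Spec_sizes num out) := by unfold Spec_sizes; infer_instance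

def pvDiffWitness_sizes : Int := -6
def pvDiffWitnessOut_sizes : (List (Int × Int)) × (List (Int × Int)) := ([(-6, 1)], [])

-- ===== CLAIM (what is proved, stated in full; the proofs are below) =====
def Claim_unchanged_sizes : Prop := ∀ (num : Int), Dom_sizes num → Pre_sizes num → Spec_sizes num (sizes num)
def Claim_changed_sizes : Prop := Dom_sizes (pvDiffWitness_sizes) ∧ Pre_sizes (pvDiffWitness_sizes) ∧ D_sizes (pvDiffWitness_sizes) ∧ sizes (pvDiffWitness_sizes) = pvDiffWitnessOut_sizes.1 ∧ sizes_alt (pvDiffWitness_sizes) = pvDiffWitnessOut_sizes.2 ∧ pvDiffWitnessOut_sizes.1 ≠ pvDiffWitnessOut_sizes.2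
def Claim_exact_sizes : Prop := ∀ (num : Int), Dom_sizes num → Pre_sizes num → D_sizes num → sizes num ≠ sizes_alt num

-- ===== LEMMAS AND PROOFS =====

theorem pv_trial_pairwise (num : Int) (t : Nat) : ∀ d : Int,
    (trialLoop num d t).Pairwise (· < ·) ∧ ∀ x ∈ trialLoop num d t, d ≤ x := by
  induction t with
  | zero => intro d; simp [trialLoop]
  | succ t ih =>
    intro d
    obtain ⟨ih1, ih2⟩ := ih (d + 1)
    simp only [trialLoop]
    split_ifs with hc hm
    · refine ⟨List.pairwise_cons.mpr ⟨fun x hx => by have := ih2 x hx; omega, ih1⟩, ?_⟩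
      intro x hx
      rcases List.mem_cons.mp hx with h | h
      · omega
      · have := ih2 x h; omega
    · exact ⟨by simpa using ih1, fun x hx => by have := ih2 x (by simpa using hx); omega⟩
    · simp

theorem pv_mem_trial {num x : Int} (t : Nat) : ∀ d : Int, 1 ≤ d → num < d + t →
    (x ∈ trialLoop num d t ↔ (d ≤ x ∧ x * x ≤ num ∧ x ∣ num)) := by
  induction t with
  | zero =>
    intro d hd hf
    simp only [trialLoop, List.not_mem_nil, false_iff]
    rintro ⟨h1, h2, h3⟩
    have hx1 : 1 ≤ x := by omega
    have hf' : num < d := by push_cast at hf; omega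
    nlinarith [mul_nonneg (by omega : (0:Int) ≤ x - 1) (by omega : (0:Int) ≤ x)]
  | succ t ih =>
    intro d hd hf
    simp only [trialLoop]
    split_ifs with hc hm
    · rw [List.mem_append, List.mem_singleton, ih (d+1) (by omega) (by push_cast at hf; omega)]
      constructor
      · rintro (heq | ⟨h1, h2, h3⟩)
        · subst heq
          exact ⟨le_refl _, hc, (PySem.Int.mod_eq_zero_iff_dvd num x).mp (by simpa using hm)⟩
        · exact ⟨by omega, h2, h3⟩
      · rintro ⟨h1, h2, h3⟩
        rcases h1.eq_or_lt with heq | h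
        · exact Or.inl heq.symm
        · exact Or.inr ⟨by omega, h2, h3⟩
    · rw [List.nil_append, ih (d+1) (by omega) (by push_cast at hf; omega)]
      constructor
      · rintro ⟨h1, h2, h3⟩; exact ⟨by omega, h2, h3⟩
      · rintro ⟨h1, h2, h3⟩
        refine ⟨?_, h2, h3⟩
        rcases h1.eq_or_lt with heq | h
        · subst heq
          exact absurd ((PySem.Int.mod_eq_zero_iff_dvd num d).mpr h3) (by simpa using hm)
        · omega
    · simp only [List.not_mem_nil, false_iff]
      rintro ⟨h1, h2, h3⟩
      nlinarith [mul_self_nonneg (x - d)]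

theorem pv_mem_factorA {num x : Int} (h1 : 1 ≤ num) :
    (x ∈ ((PySem.List.pyRange 1 (PySem.Int.floordiv num 2 + 1) 1).filter
        (fun d => PySem.Int.mod num d == 0)) ++ [num]) ↔ (1 ≤ x ∧ x ∣ num) := by
  rw [List.mem_append, List.mem_singleton, List.mem_filter,
    PySem.List.mem_pyRange_one]
  rw [PySem.Int.floordiv_eq_ediv_of_pos (by omega : (0:Int) < 2)]
  constructor
  · rintro (⟨⟨hx1, hx2⟩, hp⟩ | rfl)
    · exact ⟨hx1, (PySem.Int.mod_eq_zero_iff_dvd num x).mp (by simpa using hp)⟩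
    · exact ⟨h1, dvd_refl _⟩
  · rintro ⟨hx1, hdvd⟩
    by_cases hx : x = num
    · exact Or.inr hx
    · left
      refine ⟨⟨hx1, ?_⟩, by simpa using (PySem.Int.mod_eq_zero_iff_dvd num x).mpr hdvd⟩
      obtain ⟨k, hk⟩ := hdvd
      have hk1 : 2 ≤ k := by
        rcases lt_or_ge k 1 with h | h
        · nlinarith
        · rcases h.eq_or_lt' with heq | h2
          · exfalso; subst heq; omega
          · omega
      have : 2 * x ≤ num := by nlinarith
      omega

theorem pv_filterMap_if {α β : Type} (p : α → Prop) [DecidablePred p] (h : α → β) (l : List α) :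
    l.filterMap (fun d => if p d then some (h d) else none) = (l.filter (fun d => decide (p d))).map h := by
  induction l with
  | nil => rfl
  | cons a l ih => by_cases hp : p a <;> simp [hp, ih]



theorem pv_fd_mul {num d : Int} (hd : 0 < d) (hdvd : d ∣ num) :
    PySem.Int.floordiv num d * d = num := by
  rw [PySem.Int.floordiv_eq_ediv_of_pos hd]
  exact Int.ediv_mul_cancel hdvd

theorem pv_fd_pos {num d : Int} (h1 : 1 ≤ num) (hd : 0 < d) (hdvd : d ∣ num) :
    0 < PySem.Int.floordiv num d := by
  have h := pv_fd_mul hd hdvd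
  nlinarith [h]

theorem pv_fd_fd {num d : Int} (h1 : 1 ≤ num) (hd : 0 < d) (hdvd : d ∣ num) :
    PySem.Int.floordiv num (PySem.Int.floordiv num d) = d := by
  have hq := pv_fd_mul hd hdvd
  have hqpos := pv_fd_pos h1 hd hdvd
  rw [PySem.Int.floordiv_eq_ediv_of_pos hqpos]
  calc num / PySem.Int.floordiv num d
      = (PySem.Int.floordiv num d * d) / PySem.Int.floordiv num d := by rw [hq]
    _ = d := Int.mul_ediv_cancel_left d (by omega)

theorem pv_fd_dvd {num d : Int} (hd : 0 < d) (hdvd : d ∣ num) :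
    PySem.Int.floordiv num d ∣ num :=
  ⟨d, (pv_fd_mul hd hdvd).symm⟩

theorem pv_eq_of_mem_pairwise {l₁ l₂ : List Int}
    (h₁ : l₁.Pairwise (· < ·)) (h₂ : l₂.Pairwise (· < ·))
    (hm : ∀ x, x ∈ l₁ ↔ x ∈ l₂) : l₁ = l₂ := by
  have n₁ : l₁.Nodup := h₁.imp (fun h => ne_of_lt h)
  have n₂ : l₂.Nodup := h₂.imp (fun h => ne_of_lt h)
  exact ((List.perm_ext_iff_of_nodup n₁ n₂).mpr hm).eq_of_pairwise
    (fun a b _ _ h h' => le_antisymm h h') (h₁.imp le_of_lt) (h₂.imp le_of_lt)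

theorem pv_main (num : Int) (h1 : 1 ≤ num) : sizes num = sizes_alt num := by
  have hmemS : ∀ x : Int, x ∈ trialLoop num 1 num.toNat ↔ (1 ≤ x ∧ x * x ≤ num ∧ x ∣ num) := by
    intro x
    rw [pv_mem_trial num.toNat 1 (le_refl _) (by omega)]
  obtain ⟨hpwS, _⟩ := pv_trial_pairwise num num.toNat 1
  have hS : ∀ x ∈ trialLoop num 1 num.toNat, 1 ≤ x ∧ x * x ≤ num ∧ x ∣ num :=
    fun x hx => (hmemS x).mp hx
  set small := trialLoop num 1 num.toNat with hsmall
  set big : List Int := (small.reverse.filter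
      (fun d => decide (PySem.Int.floordiv num d ≠ d))).map
      (fun d => PySem.Int.floordiv num d) with hbig
  have hstep1 : small.reverse.filterMap (fun d =>
      if PySem.Int.floordiv num d ≠ d then some (PySem.Int.floordiv num d, d) else none) =
      big.map (fun dv => (dv, PySem.Int.floordiv num dv)) := by
    rw [pv_filterMap_if (fun d => PySem.Int.floordiv num d ≠ d)
      (fun d => (PySem.Int.floordiv num d, d)) small.reverse]
    rw [hbig, List.map_map]
    apply List.map_congr_left
    intro d hd
    have hdS : d ∈ small := List.mem_reverse.mp (List.mem_filter.mp hd).1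
    obtain ⟨hd1, _, hddvd⟩ := hS d hdS
    simp only [Function.comp]
    rw [pv_fd_fd h1 (by omega) hddvd]
  have hmemBig : ∀ y : Int, y ∈ big ↔
      ∃ d ∈ small, PySem.Int.floordiv num d ≠ d ∧ PySem.Int.floordiv num d = y := by
    intro y
    rw [hbig]
    simp only [List.mem_map, List.mem_filter, List.mem_reverse, decide_eq_true_eq]
    constructor
    · rintro ⟨d, ⟨hdS, hne⟩, rfl⟩; exact ⟨d, hdS, hne, rfl⟩
    · rintro ⟨d, hdS, hne, rfl⟩; exact ⟨d, ⟨hdS, hne⟩, rfl⟩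
  have hLA : ((PySem.List.pyRange 1 (PySem.Int.floordiv num 2 + 1) 1).filter
      (fun d => PySem.Int.mod num d == 0)) ++ [num] = small ++ big := by
    apply pv_eq_of_mem_pairwise
    · rw [List.pairwise_append]
      refine ⟨(PySem.List.pairwise_lt_pyRange_one 1 _).filter _, by simp, ?_⟩
      intro x hx y hy
      rw [List.mem_singleton] at hy; subst hy
      have hx' := (PySem.List.mem_pyRange_one.mp (List.mem_filter.mp hx).1)
      rw [PySem.Int.floordiv_eq_ediv_of_pos (by omega : (0:Int) < 2)] at hx'
      omega
    · rw [List.pairwise_append]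
      refine ⟨hpwS, ?_, ?_⟩
      · rw [hbig]
        rw [List.pairwise_map]
        apply List.Pairwise.imp_of_mem ?_ ((List.pairwise_reverse.mpr hpwS).filter _)
        intro a b ha hb hab
        have haS := List.mem_reverse.mp (List.mem_filter.mp ha).1
        have hbS := List.mem_reverse.mp (List.mem_filter.mp hb).1
        obtain ⟨ha1, _, hadvd⟩ := hS a haS
        obtain ⟨hb1, _, hbdvd⟩ := hS b hbS
        have hqa := pv_fd_mul (show (0:Int) < a by omega) hadvd
        have hqb := pv_fd_mul (show (0:Int) < b by omega) hbdvd
        have hqa1 := pv_fd_pos h1 (show (0:Int) < a by omega) hadvd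
        have hqb1 := pv_fd_pos h1 (show (0:Int) < b by omega) hbdvd
        nlinarith
      · intro x hxS y hy
        obtain ⟨d, hdS, hne, rfl⟩ := (hmemBig y).mp hy
        obtain ⟨hx1, hx2, _⟩ := hS x hxS
        obtain ⟨hd1, hd2, hddvd⟩ := hS d hdS
        have hqd := pv_fd_mul (show (0:Int) < d by omega) hddvd
        have hqd1 := pv_fd_pos h1 (show (0:Int) < d by omega) hddvd
        have hgt : d < PySem.Int.floordiv num d := by
          rcases lt_trichotomy (PySem.Int.floordiv num d) d with h | h | h
          · nlinarith
          · exact absurd h hne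
          · exact h
        nlinarith
    · intro x
      rw [pv_mem_factorA h1, List.mem_append, hmemS]
      constructor
      · rintro ⟨hx1, hdvd⟩
        by_cases hsq : x * x ≤ num
        · exact Or.inl ⟨hx1, hsq, hdvd⟩
        · right
          rw [hmemBig]
          refine ⟨PySem.Int.floordiv num x, ?_, ?_, pv_fd_fd h1 (by omega) hdvd⟩
          · rw [hmemS]
            have hqx := pv_fd_mul (show (0:Int) < x by omega) hdvd
            have hqx1 := pv_fd_pos h1 (show (0:Int) < x by omega) hdvd
            refine ⟨by omega, ?_, pv_fd_dvd (by omega) hdvd⟩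
            nlinarith
          · rw [pv_fd_fd h1 (by omega) hdvd]
            intro heq
            have hqx := pv_fd_mul (show (0:Int) < x by omega) hdvd
            rw [← heq] at hqx
            exact hsq (le_of_eq hqx)
      · rintro (hxs | hxb)
        · obtain ⟨hx1, _, hdvd⟩ := hxs
          exact ⟨hx1, hdvd⟩
        · obtain ⟨d, hdS, _, rfl⟩ := (hmemBig x).mp hxb
          obtain ⟨hd1, _, hddvd⟩ := hS d hdS
          exact ⟨pv_fd_pos h1 (by omega) hddvd, pv_fd_dvd (by omega) hddvd⟩
  show (((PySem.List.pyRange 1 (PySem.Int.floordiv num 2 + 1) 1).filter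
      (fun d => PySem.Int.mod num d == 0)) ++ [num]).map
      (fun dv => (dv, PySem.Int.floordiv num dv)) = sizes_alt num
  rw [hLA, List.map_append]
  show _ = small.map (fun d => (d, PySem.Int.floordiv num d)) ++
      small.reverse.filterMap (fun d =>
        if PySem.Int.floordiv num d ≠ d then some (PySem.Int.floordiv num d, d) else none)
  rw [hstep1]

-- A on negatives: the range is empty and the trailing 'yield num' alone fires
theorem pv_A_neg (num : Int) (hneg : num < 0) : sizes num = [(num, 1)] := by
  show (((PySem.List.pyRange 1 (PySem.Int.floordiv num 2 + 1) 1).filter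
      (fun d => PySem.Int.mod num d == 0)) ++ [num]).map
      (fun dv => (dv, PySem.Int.floordiv num dv)) = [(num, 1)]
  rw [PySem.List.pyRange_one_eq_nil (by
    rw [PySem.Int.floordiv_eq_ediv_of_pos (by omega : (0:Int) < 2)]; omega)]
  simp [PySem.Int.floordiv, Int.fdiv_self (show num ≠ 0 by omega)]

-- B on negatives: the trial loop never runs
theorem pv_B_neg (num : Int) (hneg : num < 0) : sizes_alt num = [] := by
  show (trialLoop num 1 num.toNat).map (fun d => (d, PySem.Int.floordiv num d)) ++
      (trialLoop num 1 num.toNat).reverse.filterMap (fun d =>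
        if PySem.Int.floordiv num d ≠ d then some (PySem.Int.floordiv num d, d) else none) = []
  rw [Int.toNat_of_nonpos hneg.le]
  simp [trialLoop]

-- ===== VERDICT (by name: the statement is the Claim_ definition above) =====
theorem sizes_spec : Claim_unchanged_sizes := by
  intro num _ hpre hnd
  have h1 : 1 ≤ num := by
    unfold Pre_sizes at hpre; unfold D_sizes at hnd; omega
  exact pv_main num h1

theorem sizes_changed : Claim_changed_sizes := by
  unfold Claim_changed_sizes; decide

theorem sizes_tight : Claim_exact_sizes := by
  intro num _ _ hd
  rw [pv_A_neg num hd, pv_B_neg num hd]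
  simp
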